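-- pv_equiv track=rewrite | github.com/jiang718/MusicTheory | Posttonal/series.py | notpass
-- ===== SOURCE A (Python) =====
-- def modn(x, n):
--     return (x % n + n) % n
--
-- def notpass(x):
--     f = [0 for i in range(12)]
--     if len(x) < 12:
--         return True
--     for i in x:
--         k = modn(i, 12)
--         f[k] = f[k] + 1
--         if f[k] > 1:
--             return True
--     return False
-- ===== SOURCE B (Python) =====
-- def notpass(x):
--     # Pigeonhole: a 12-tone row passes iff it has exactly 12 notes and its
--     # pitch classes, sorted, are exactly 0..11; every other input fails.
--     return len(x) != 12 or sorted(i % 12 for i in x) != list(range(12))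
-- ===== Notes on version B (the rewrite author's own statement) =====
-- stated objective: simpler
-- what changed: Replaces the counter-array duplicate scan with a pigeonhole characterisation: the row passes iff it has exactly 12 elements and its sorted mod-12 residues equal the list 0..11, so B sorts once and compares against range(12) instead of counting occurrences.
import Mathlib
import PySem

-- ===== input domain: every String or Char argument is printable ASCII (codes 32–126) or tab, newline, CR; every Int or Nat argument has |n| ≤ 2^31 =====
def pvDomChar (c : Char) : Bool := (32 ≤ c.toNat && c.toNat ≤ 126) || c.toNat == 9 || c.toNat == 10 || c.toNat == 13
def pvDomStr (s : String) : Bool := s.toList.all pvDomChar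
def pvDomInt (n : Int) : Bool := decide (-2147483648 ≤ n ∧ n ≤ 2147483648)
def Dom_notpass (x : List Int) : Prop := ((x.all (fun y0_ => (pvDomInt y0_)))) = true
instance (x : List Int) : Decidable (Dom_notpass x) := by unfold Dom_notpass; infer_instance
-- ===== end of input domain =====

-- B replaces the counter-array duplicate scan by a pigeonhole characterisation:
-- the row passes iff it has exactly 12 elements and its sorted residues are 0..11.

-- ===== PORT A =====
-- helper modn(x, n) = (x % n + n) % n
def modnA (x n : Int) : Int := PySem.Int.mod (PySem.Int.mod x n + n) n

-- the 'for i in x' loop with its counter list f and early return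
def notpassGo (f : List Int) : List Int → Bool
  | [] => false
  | i :: rest =>
    let k := modnA i 12
    let v := PySem.List.pyGetD f k 0 + 1
    let f' := PySem.List.pySetD f k v
    if v > 1 then true else notpassGo f' rest

def notpass (x : List Int) : Bool :=
  let f := List.replicate 12 (0 : Int)
  if x.length < 12 then true
  else notpassGo f x

-- ===== PORT B =====
def notpass_alt (x : List Int) : Bool :=
  decide (x.length ≠ 12) ||
    decide (PySem.List.sorted (x.map (fun i => PySem.Int.mod i 12)) (fun v => v) false
              ≠ PySem.List.pyRange 0 12 1)

-- ===== PRECONDITION & SPEC =====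
def Spec_notpass (x : List Int) (out : Bool) : Prop := out = notpass_alt x
instance (x : List Int) (out : Bool) : Decidable (Spec_notpass x out) := by unfold Spec_notpass; infer_instance

-- ===== CLAIM (what is proved, stated in full; the proofs are below) =====
def Claim_equal_notpass : Prop := ∀ (x : List Int), Dom_notpass x → Spec_notpass x (notpass x)

-- ===== LEMMAS AND PROOFS =====

theorem modnA_eq_mod (i : Int) : modnA i 12 = PySem.Int.mod i 12 := by
  have h1 := PySem.Int.mod_nonneg i (b := 12) (by norm_num)
  have h2 := PySem.Int.mod_lt i (b := 12) (by norm_num)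
  unfold modnA
  rw [PySem.Int.mod_eq_emod_of_pos (a := PySem.Int.mod i 12 + 12) (by norm_num)]
  omega

-- loop invariant: f's slots are nonnegative, and slot k is >= 1 exactly for residues k in the seen-set s
theorem notpassGo_spec (xs : List Int) : ∀ (f s : List Int), f.length = 12 →
    (∀ k : Int, 0 ≤ k → k < 12 → 0 ≤ PySem.List.pyGetD f k 0) →
    (∀ k : Int, 0 ≤ k → k < 12 → (1 ≤ PySem.List.pyGetD f k 0 ↔ k ∈ s)) →
    (notpassGo f xs = true ↔
      ¬ (xs.map (fun i => PySem.Int.mod i 12)).Nodup ∨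
        ∃ i ∈ xs, PySem.Int.mod i 12 ∈ s) := by
  induction xs with
  | nil => intro f s hlen hnn hinv; simp [notpassGo]
  | cons i rest ih =>
    intro f s hlen hnn hinv
    have hk0 := PySem.Int.mod_nonneg i (b := 12) (by norm_num)
    have hk12 := PySem.Int.mod_lt i (b := 12) (by norm_num)
    simp only [notpassGo, modnA_eq_mod]
    set k := PySem.Int.mod i 12 with hk
    by_cases hmem : k ∈ s
    · have h1 : (1 : Int) ≤ PySem.List.pyGetD f k 0 := (hinv k hk0 hk12).2 hmem
      rw [if_pos (by omega)]
      exact iff_of_true rfl (Or.inr ⟨i, List.mem_cons_self, hmem⟩)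
    · have hlt : ¬ (1 : Int) ≤ PySem.List.pyGetD f k 0 := fun h => hmem ((hinv k hk0 hk12).1 h)
      rw [if_neg (by omega)]
      have hset : PySem.List.pySetD f k (PySem.List.pyGetD f k 0 + 1)
          = f.set k.toNat (PySem.List.pyGetD f k 0 + 1) := PySem.List.pySetD_of_nonneg f _ hk0
      have hlen' : (PySem.List.pySetD f k (PySem.List.pyGetD f k 0 + 1)).length = 12 := by
        rw [hset]; simpa using hlen
      have hgd : ∀ j : Int, 0 ≤ j → j < 12 →
          PySem.List.pyGetD (PySem.List.pySetD f k (PySem.List.pyGetD f k 0 + 1)) j 0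
            = if j = k then PySem.List.pyGetD f k 0 + 1 else PySem.List.pyGetD f j 0 := by
        intro j hj0 hj12
        rw [hset, PySem.List.pyGetD_of_nonneg _ _ hj0, List.getD_eq_getElem?_getD]
        by_cases hjk : j = k
        · subst hjk
          rw [List.getElem?_set_self (by omega), if_pos rfl]
          rfl
        · have hne : k.toNat ≠ j.toNat := fun h => hjk (by omega)
          rw [List.getElem?_set_ne hne, if_neg hjk, ← List.getD_eq_getElem?_getD,
            ← PySem.List.pyGetD_of_nonneg f _ hj0]
      have hnn' : ∀ j : Int, 0 ≤ j → j < 12 →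
          0 ≤ PySem.List.pyGetD (PySem.List.pySetD f k (PySem.List.pyGetD f k 0 + 1)) j 0 := by
        intro j hj0 hj12
        rw [hgd j hj0 hj12]
        split
        · have := hnn k hk0 hk12; omega
        · exact hnn j hj0 hj12
      have hinv' : ∀ j : Int, 0 ≤ j → j < 12 →
          (1 ≤ PySem.List.pyGetD (PySem.List.pySetD f k (PySem.List.pyGetD f k 0 + 1)) j 0 ↔ j ∈ k :: s) := by
        intro j hj0 hj12
        rw [hgd j hj0 hj12, List.mem_cons]
        by_cases hjk : j = k
        · rw [if_pos hjk]
          have := hnn k hk0 hk12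
          constructor
          · intro _; exact Or.inl hjk
          · intro _; omega
        · rw [if_neg hjk, hinv j hj0 hj12]
          simp [hjk]
      rw [ih _ (k :: s) hlen' hnn' hinv']
      have hkR : k ∈ rest.map (fun i => PySem.Int.mod i 12) ↔
          ∃ a ∈ rest, PySem.Int.mod a 12 = k := List.mem_map
      simp only [List.map_cons, List.nodup_cons, List.mem_cons]
      constructor
      · rintro (hnd | ⟨i', hi', hres⟩)
        · exact Or.inl (fun h => hnd h.2)
        · rcases hres with heq | hin
          · exact Or.inl (fun h => h.1 (hkR.2 ⟨i', hi', heq⟩))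
          · exact Or.inr ⟨i', Or.inr hi', hin⟩
      · rintro (hnd | ⟨i', hi', hres⟩)
        · by_cases hkr : k ∈ rest.map (fun i => PySem.Int.mod i 12)
          · rcases hkR.1 hkr with ⟨a, ha, hb⟩
            exact Or.inr ⟨a, ha, Or.inl hb⟩
          · exact Or.inl (fun h => hnd ⟨hkr, h⟩)
        · rcases hi' with hi' | hi'
          · subst hi'
            exact absurd hres hmem
          · exact Or.inr ⟨i', hi', Or.inr hres⟩

-- residues live in [0, 12)
theorem residues_mem_Ico (x : List Int) :
    ∀ r ∈ x.map (fun i => PySem.Int.mod i 12), r ∈ Finset.Ico (0 : Int) 12 := by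
  intro r hr
  rcases List.mem_map.1 hr with ⟨i, _, rfl⟩
  have h1 := PySem.Int.mod_nonneg i (b := 12) (by norm_num)
  have h2 := PySem.Int.mod_lt i (b := 12) (by norm_num)
  simp only [Finset.mem_Ico]
  exact ⟨h1, h2⟩

-- a nodup list of length ≥ 12 of residues cannot exist beyond length 12, and at exactly 12 it is a permutation of range 12
theorem nodup_residues_perm (l : List Int) (hl : ∀ r ∈ l, r ∈ Finset.Ico (0 : Int) 12)
    (hnd : l.Nodup) (hlen : l.length = 12) : l.Perm (PySem.List.pyRange 0 12 1) := by
  have hsub : l.toFinset ⊆ Finset.Ico (0 : Int) 12 := fun a ha => hl a (List.mem_toFinset.1 ha)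
  have hcard : l.toFinset.card = 12 := by rw [List.toFinset_card_of_nodup hnd, hlen]
  have hIco : (Finset.Ico (0 : Int) 12).card = 12 := by decide
  have heq : l.toFinset = Finset.Ico (0 : Int) 12 :=
    Finset.eq_of_subset_of_card_le hsub (by omega)
  have hRnd : (PySem.List.pyRange 0 12 1).Nodup := PySem.List.nodup_pyRange_one 0 12
  have hRfin : (PySem.List.pyRange 0 12 1).toFinset = Finset.Ico (0 : Int) 12 := by decide
  exact List.perm_of_nodup_nodup_toFinset_eq hnd hRnd (heq.trans hRfin.symm)

-- B's comparison: sorted residues = range 12 iff residues nodup (given length = 12)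
theorem sorted_eq_range_iff (x : List Int) (hlen : x.length = 12) :
    PySem.List.sorted (x.map (fun i => PySem.Int.mod i 12)) (fun v => v) false
        = PySem.List.pyRange 0 12 1
      ↔ (x.map (fun i => PySem.Int.mod i 12)).Nodup := by
  set l := x.map (fun i => PySem.Int.mod i 12) with hldef
  constructor
  · intro h
    have hperm : (PySem.List.pyRange 0 12 1).Perm l := h ▸ PySem.List.sorted_perm l _ false
    exact hperm.nodup_iff.1 (PySem.List.nodup_pyRange_one 0 12)
  · intro hnd
    have hperm : l.Perm (PySem.List.pyRange 0 12 1) :=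
      nodup_residues_perm l (residues_mem_Ico x) hnd (by simp [hldef, hlen])
    exact PySem.List.sorted_eq_of_perm_of_pairwise_lt l (PySem.List.pyRange 0 12 1)
      (fun v => v) hperm.symm (PySem.List.pairwise_lt_pyRange_one 0 12)

-- pigeonhole: more than 12 residues in [0,12) must repeat
theorem not_nodup_of_long (x : List Int) (hlen : 12 < x.length) :
    ¬ (x.map (fun i => PySem.Int.mod i 12)).Nodup := by
  intro hnd
  have hsub : (x.map (fun i => PySem.Int.mod i 12)).toFinset ⊆ Finset.Ico (0 : Int) 12 :=
    fun a ha => residues_mem_Ico x a (List.mem_toFinset.1 ha)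
  have hcard := List.toFinset_card_of_nodup hnd
  have hle := Finset.card_le_card hsub
  have hIco : (Finset.Ico (0 : Int) 12).card = 12 := by decide
  simp only [List.length_map] at hcard
  omega

-- ===== VERDICT (by name: the statement is the Claim_ definition above) =====
theorem notpass_spec : Claim_equal_notpass := by
  intro x _
  unfold Spec_notpass notpass notpass_alt
  by_cases hlen : x.length < 12
  · rw [if_pos hlen, decide_eq_true (by omega : x.length ≠ 12)]
    simp
  · rw [if_neg hlen]
    have hrep : ∀ k : Int, 0 ≤ k → k < 12 →
        PySem.List.pyGetD (List.replicate 12 (0 : Int)) k 0 = 0 := by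
      intro k hk0 hk12
      rw [PySem.List.pyGetD_of_nonneg _ _ hk0, List.getD_eq_getElem?_getD]
      simp only [List.getElem?_replicate]
      rw [if_pos (by omega)]
      rfl
    have hgo : notpassGo (List.replicate 12 (0 : Int)) x = true ↔
        ¬ (x.map (fun i => PySem.Int.mod i 12)).Nodup := by
      rw [notpassGo_spec x (List.replicate 12 (0 : Int)) [] (by simp)
        (fun k hk0 hk12 => by rw [hrep k hk0 hk12])
        (fun k hk0 hk12 => by rw [hrep k hk0 hk12]; simp)]
      simp
    by_cases h12 : x.length = 12
    · rw [decide_eq_false (by omega : ¬ x.length ≠ 12), Bool.false_or,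
        Bool.eq_iff_iff, hgo, decide_eq_true_eq]
      rw [ne_eq, sorted_eq_range_iff x h12]
    · have hnd := not_nodup_of_long x (by omega)
      rw [hgo.2 hnd, decide_eq_true (by omega : x.length ≠ 12)]
      simp
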